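-- pv_equiv track=rewrite | github.com/imlifeilong/PythonCaseAlgorithmRepo | basic/题/HW/60RSA 加密算法、素数之积.py | result
-- ===== SOURCE A (Python) =====
-- def result(num):
--     factors = set()  # 使用集合进行去重
--     tmp = num  # 用tmp保存num的副本，方便后面进行计算
--     f = 2  # 最小质数从2开始。要记得这个方法。
--     while tmp != 1:
--         if tmp % f != 0:
--             f += 1  # 如果tmp不能被f整除，尝试下一个更大的f
--         else:
--             # 将找到的因数f添加到factors集合中
--             factors.add(f)
--             tmp //= f  # 除以因数f，更新tmp的值，去除重复的因数
--
--     for i in factors: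
--         for j in factors:
--             # 如果两个数相乘要等于num
--             if i * j == num:
--                 min_factor = min(i, j)
--                 max_factor = max(i, j)
--                 return (f"{min_factor} {max_factor}")
--     # 没有找到
--     return "-1, -1"
-- ===== SOURCE B (Python) =====
-- def result(num):
--     # same trial-division loop as A, but record factors WITH multiplicity;
--     # num is a product of two primes iff it has exactly 2 prime factors counted
--     # with multiplicity, so the nested pair-search is replaced by a length test.
--     factors = []
--     tmp = num
--     f = 2
--     while tmp != 1:
--         if tmp % f != 0:
--             f += 1
--         else:
--             factors.append(f)
--             tmp //= f
--     if len(factors) == 2: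
--         return f"{min(factors)} {max(factors)}"
--     return "-1, -1"
-- ===== Notes on version B (the rewrite author's own statement) =====
-- stated objective: simpler
-- what changed: B records prime factors with multiplicity in a list and replaces A's nested pair-search over the factor set by a single length==2 test (a number is a product of two primes iff it has exactly two prime factors with multiplicity).
import Mathlib
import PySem

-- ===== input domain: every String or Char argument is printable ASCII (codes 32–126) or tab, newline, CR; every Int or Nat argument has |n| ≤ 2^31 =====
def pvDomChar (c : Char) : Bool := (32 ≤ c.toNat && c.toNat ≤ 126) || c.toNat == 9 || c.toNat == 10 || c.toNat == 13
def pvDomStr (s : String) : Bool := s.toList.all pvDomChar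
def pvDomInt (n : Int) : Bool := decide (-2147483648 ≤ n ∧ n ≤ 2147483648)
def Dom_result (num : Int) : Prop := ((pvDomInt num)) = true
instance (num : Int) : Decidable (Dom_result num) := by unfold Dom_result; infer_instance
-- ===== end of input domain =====

-- B replaces A's nested pair-search over the deduplicated factor set by a single
-- length-2 test on the factor list kept with multiplicity (simpler final pass).

-- ===== PORT A =====
-- the while-loop; fuel only makes it total, Pre_result guarantees the fuel suffices
def result_loopA : Nat → Int → Int → PySem.Set Int → PySem.Set Int
  | 0, _, _, s => s
  | fuel + 1, tmp, f, s =>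
    if tmp = 1 then s
    else if PySem.Int.mod tmp f ≠ 0 then result_loopA fuel tmp (f + 1) s
    else result_loopA fuel (PySem.Int.floordiv tmp f) f (PySem.Set.add s f)

-- 'for j in factors: if i * j == num: return …' (first hit)
def result_inner (num i : Int) : List Int → Option Int
  | [] => none
  | j :: js => if i * j = num then some j else result_inner num i js

-- 'for i in factors: …' around the inner loop
def result_outer (num : Int) (js : List Int) : List Int → Option (Int × Int)
  | [] => none
  | i :: is =>
    match result_inner num i js with
    | some j => some (i, j)
    | none => result_outer num js is

def result (num : Int) : String :=
  let factors := result_loopA (2 * num.toNat + 2) num 2 PySem.Set.empty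
  match result_outer num factors factors with
  | some (i, j) => PySem.Int.toStr (min i j) ++ " " ++ PySem.Int.toStr (max i j)
  | none => "-1, -1"

-- ===== PORT B =====
-- same trial-division loop, but appending to a list (multiplicity kept)
def result_loopB : Nat → Int → Int → List Int → List Int
  | 0, _, _, acc => acc
  | fuel + 1, tmp, f, acc =>
    if tmp = 1 then acc
    else if PySem.Int.mod tmp f ≠ 0 then result_loopB fuel tmp (f + 1) acc
    else result_loopB fuel (PySem.Int.floordiv tmp f) f (acc ++ [f])

def result_alt (num : Int) : String :=
  let factors := result_loopB (2 * num.toNat + 2) num 2 []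
  if factors.length = 2 then
    match PySem.List.min? factors (fun x => x), PySem.List.max? factors (fun x => x) with
    | some a, some b => PySem.Int.toStr a ++ " " ++ PySem.Int.toStr b
    | _, _ => "-1, -1"
  else "-1, -1"

-- ===== PRECONDITION & SPEC =====
-- Pre_ excludes num ≤ 0, where the Python while-loop of both A and B never terminates
-- (tmp never reaches 1), so A returns no value there.
def Pre_result (num : Int) : Prop := 1 ≤ num
instance (num : Int) : Decidable (Pre_result num) := by unfold Pre_result; infer_instance

def pvWitness_result : Int := 6

def Spec_result (num : Int) (out : String) : Prop := out = result_alt num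
instance (num : Int) (out : String) : Decidable (Spec_result num out) := by unfold Spec_result; infer_instance

-- ===== CLAIM (what is proved, stated in full; the proofs are below) =====
def Claim_equal_result : Prop := ∀ (num : Int), Dom_result num → Pre_result num → Spec_result num (result num)

-- ===== LEMMAS AND PROOFS =====

-- B's loop only appends to its accumulator
theorem loopB_append : ∀ (fuel : Nat) (tmp f : Int) (acc : List Int),
    result_loopB fuel tmp f acc = acc ++ result_loopB fuel tmp f [] := by
  intro fuel
  induction fuel with
  | zero => intro tmp f acc; simp [result_loopB]
  | succ n ih =>
    intro tmp f acc
    by_cases h1 : tmp = 1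
    · simp [result_loopB, h1]
    · by_cases h2 : PySem.Int.mod tmp f ≠ 0
      · simp only [result_loopB, if_neg h1, if_pos h2]
        exact ih tmp (f+1) acc
      · simp only [result_loopB, if_neg h1, if_neg h2]
        rw [ih _ _ (acc ++ [f]), ih _ _ ([] ++ [f])]
        simp

-- A's loop builds exactly the set of B's factors
theorem loopA_eq_foldl : ∀ (fuel : Nat) (tmp f : Int) (s : PySem.Set Int),
    result_loopA fuel tmp f s = List.foldl PySem.Set.add s (result_loopB fuel tmp f []) := by
  intro fuel
  induction fuel with
  | zero => intro tmp f s; simp [result_loopA, result_loopB]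
  | succ n ih =>
    intro tmp f s
    by_cases h1 : tmp = 1
    · simp [result_loopA, result_loopB, h1]
    · by_cases h2 : PySem.Int.mod tmp f ≠ 0
      · simp [result_loopA, result_loopB, h1, h2, ih]
      · simp only [result_loopA, result_loopB, if_neg h1, if_neg h2]
        rw [ih, loopB_append _ _ _ ([] ++ [f])]
        simp

-- characterization of the trial-division loop: it produces a nondecreasing list of
-- primes (stated by minimal-divisor) whose product is tmp, all ≥ f
theorem loopB_char : ∀ (fuel : Nat) (tmp f : Int), 1 ≤ tmp → 2 ≤ f →
    (∀ k : Int, 2 ≤ k → k < f → ¬ k ∣ tmp) → (tmp = 1 ∨ f ≤ tmp) →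
    2 * tmp.toNat + 2 ≤ fuel + f.toNat →
    (result_loopB fuel tmp f []).prod = tmp ∧
    (∀ p ∈ result_loopB fuel tmp f [], f ≤ p ∧ 2 ≤ p ∧
        (∀ k : Int, 2 ≤ k → k < p → ¬ k ∣ p)) ∧
    (result_loopB fuel tmp f []).Pairwise (· ≤ ·) := by
  intro fuel
  induction fuel with
  | zero =>
    intro tmp f h1 hf hmin hd hfuel
    rcases hd with h | h
    · subst h; simp [result_loopB]
    · exfalso; omega
  | succ n ih =>
    intro tmp f h1 hf hmin hd hfuel
    by_cases htmp1 : tmp = 1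
    · subst htmp1; simp [result_loopB]
    have htmp2 : 2 ≤ tmp := by omega
    have hfle : f ≤ tmp := hd.resolve_left htmp1
    by_cases hdvd : f ∣ tmp
    · -- divisible branch
      have hmod : ¬ (PySem.Int.mod tmp f ≠ 0) := by
        simp [PySem.Int.mod_eq_zero_iff_dvd, hdvd]
      simp only [result_loopB, if_neg htmp1, if_neg hmod]
      rw [loopB_append]
      simp only [List.nil_append, List.singleton_append]
      set tmp' := PySem.Int.floordiv tmp f with htmp'
      rcases hdvd with ⟨c, hc⟩
      have hfpos : (0:Int) < f := by omega
      have hc' : tmp' = c := by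
        rw [htmp', PySem.Int.floordiv_eq_ediv_of_pos hfpos, hc,
          Int.mul_ediv_cancel_left _ (by omega : f ≠ 0)]
      have hcpos : 1 ≤ c := by nlinarith
      have hmin' : ∀ k : Int, 2 ≤ k → k < f → ¬ k ∣ tmp' := by
        intro k hk2 hkf hkdvd
        exact hmin k hk2 hkf (by rw [hc]; exact Dvd.dvd.mul_left (hc' ▸ hkdvd) f)
      have hd' : tmp' = 1 ∨ f ≤ tmp' := by
        by_cases h1' : tmp' = 1
        · exact Or.inl h1'
        · right
          by_contra hlt
          push Not at hlt
          have hc2 : 2 ≤ tmp' := by omega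
          exact hmin' tmp' hc2 hlt dvd_rfl
      have h2t : 2 * tmp' ≤ tmp := by rw [hc', hc]; nlinarith
      have hfuel' : 2 * tmp'.toNat + 2 ≤ n + f.toNat := by omega
      have h1' : 1 ≤ tmp' := by omega
      obtain ⟨ihprod, ihmem, ihpw⟩ := ih tmp' f h1' hf hmin' hd' hfuel'
      have hfprime : ∀ k : Int, 2 ≤ k → k < f → ¬ k ∣ f := by
        intro k hk2 hkf hkdvd
        exact hmin k hk2 hkf (hkdvd.trans ⟨c, hc⟩)
      refine ⟨?_, ?_, ?_⟩
      · simp only [List.prod_cons, ihprod]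
        rw [hc', hc]
      · intro p hp
        rcases List.mem_cons.mp hp with h | h
        · subst h; exact ⟨le_refl _, hf, hfprime⟩
        · obtain ⟨hfp, h2p, hpr⟩ := ihmem p h
          exact ⟨hfp, h2p, hpr⟩
      · exact List.Pairwise.cons (fun p hp => (ihmem p hp).1) ihpw
    · -- not divisible: f += 1
      have hmod : PySem.Int.mod tmp f ≠ 0 := by
        simp [PySem.Int.mod_eq_zero_iff_dvd, hdvd]
      simp only [result_loopB, if_neg htmp1, if_pos hmod]
      have hflt : f < tmp := by
        rcases eq_or_lt_of_le hfle with h | h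
        · exact absurd (h ▸ dvd_rfl) hdvd
        · exact h
      have hmin' : ∀ k : Int, 2 ≤ k → k < f + 1 → ¬ k ∣ tmp := by
        intro k hk2 hkf
        by_cases hkf' : k = f
        · subst hkf'; exact hdvd
        · exact hmin k hk2 (by omega)
      obtain ⟨ihprod, ihmem, ihpw⟩ := ih tmp (f+1) h1 (by omega) hmin' (Or.inr (by omega))
        (by omega)
      refine ⟨ihprod, ?_, ihpw⟩
      intro p hp
      obtain ⟨hfp, h2p, hpr⟩ := ihmem p hp
      exact ⟨by omega, h2p, hpr⟩

-- a positive Int with no divisor in [2, p) is a prime natural number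
theorem int_prime_toNat (p : Int) (h2 : 2 ≤ p)
    (hmin : ∀ k : Int, 2 ≤ k → k < p → ¬ k ∣ p) : p.toNat.Prime := by
  rw [Nat.prime_def_lt]
  refine ⟨by omega, ?_⟩
  intro m hm hdvd
  by_contra hne
  have hp : ((p.toNat : Nat) : Int) = p := Int.toNat_of_nonneg (by omega)
  rcases Nat.eq_zero_or_pos m with h0 | h0
  · subst h0; have := Nat.eq_zero_of_zero_dvd hdvd; omega
  · have hm2 : 2 ≤ m := by omega
    exact hmin (m : Int) (by exact_mod_cast hm2) (by omega)
      (by rw [← hp]; exact_mod_cast hdvd)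

theorem prod_toNat : ∀ (L : List Int), (∀ p ∈ L, 0 ≤ p) →
    (L.map Int.toNat).prod = L.prod.toNat := by
  intro L
  induction L with
  | nil => intro _; simp
  | cons a t ih =>
    intro h
    have ha : 0 ≤ a := h a (by simp)
    have ht : 0 ≤ t.prod := List.prod_nonneg (fun x hx => h x (by simp [hx]))
    simp only [List.map_cons, List.prod_cons, ih (fun p hp => h p (by simp [hp]))]
    exact (Int.toNat_mul ha ht).symm

theorem inner_none (num i : Int) : ∀ (js : List Int),
    (∀ j ∈ js, i * j ≠ num) → result_inner num i js = none := by
  intro js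
  induction js with
  | nil => intro _; rfl
  | cons j t ih =>
    intro h
    simp only [result_inner, if_neg (h j (by simp))]
    exact ih (fun x hx => h x (by simp [hx]))

theorem outer_none (num : Int) (js : List Int) : ∀ (is : List Int),
    (∀ i ∈ is, ∀ j ∈ js, i * j ≠ num) → result_outer num js is = none := by
  intro is
  induction is with
  | nil => intro _; rfl
  | cons i t ih =>
    intro h
    simp only [result_outer, inner_none num i js (h i (by simp))]
    exact ih (fun x hx => h x (by simp [hx]))

theorem mem_foldl_add {x : Int} : ∀ (L : List Int) (s : PySem.Set Int),
    x ∈ List.foldl PySem.Set.add s L → x ∈ s ∨ x ∈ L := by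
  intro L
  induction L with
  | nil => intro s h; exact Or.inl h
  | cons a t ih =>
    intro s h
    rcases ih (PySem.Set.add s a) h with h' | h'
    · rcases (PySem.Set.mem_add _ _ _).mp h' with h'' | h''
      · exact Or.inl h''
      · exact Or.inr (by simp [h''])
    · exact Or.inr (by simp [h'])

-- if two elements of the factor list multiply to num, the list has exactly 2 entries
theorem pair_length_two (num : Int) (L : List Int) (hprod : L.prod = num)
    (hmem : ∀ p ∈ L, 2 ≤ p ∧ (∀ k : Int, 2 ≤ k → k < p → ¬ k ∣ p))
    (i j : Int) (hi : i ∈ L) (hj : j ∈ L) (hij : i * j = num) : L.length = 2 := by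
  have hnn : ∀ p ∈ L, (0:Int) ≤ p := fun p hp => by have := (hmem p hp).1; omega
  have hLperm := Nat.primeFactorsList_unique (n := num.toNat)
    (l := L.map Int.toNat) (by rw [prod_toNat L hnn, hprod])
    (by
      intro p hp
      rcases List.mem_map.mp hp with ⟨q, hq, rfl⟩
      exact int_prime_toNat q (hmem q hq).1 (hmem q hq).2)
  have hi2 := (hmem i hi).1
  have hj2 := (hmem j hj).1
  have hpair := Nat.primeFactorsList_unique (n := num.toNat)
    (l := [i.toNat, j.toNat])
    (by simp only [List.prod_cons, List.prod_nil, mul_one]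
        rw [← Int.toNat_mul (by omega) (by omega), hij])
    (by
      intro p hp
      rcases List.mem_cons.mp hp with rfl | hp'
      · exact int_prime_toNat i hi2 (hmem i hi).2
      · rcases List.mem_cons.mp hp' with rfl | h
        · exact int_prime_toNat j hj2 (hmem j hj).2
        · simp at h)
  have h1 := hLperm.length_eq
  have h2 := hpair.length_eq
  simp only [List.length_map] at h1
  simp only [List.length_cons, List.length_nil] at h2
  omega

-- ===== VERDICT (by name: the statement is the Claim_ definition above) =====
theorem result_spec : Claim_equal_result := by
  unfold Claim_equal_result
  intro num _ hpre
  unfold Spec_result result result_alt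
  have hpre' : (1:Int) ≤ num := hpre
  obtain ⟨hprod, hmem, hpw⟩ := loopB_char (2 * num.toNat + 2) num 2 hpre' (le_refl 2)
    (fun k hk2 hkf _ => by omega) (by omega) (by omega)
  rw [loopA_eq_foldl]
  set L := result_loopB (2 * num.toNat + 2) num 2 [] with hL
  have hmem' : ∀ p ∈ L, 2 ≤ p ∧ (∀ k : Int, 2 ≤ k → k < p → ¬ k ∣ p) :=
    fun p hp => ⟨(hmem p hp).2.1, (hmem p hp).2.2⟩
  have hlen2 := pair_length_two num L hprod hmem'
  match hLc : L, hprod, hpw, hmem', hlen2 with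
  | [], hprod, _, _, _ =>
    simp [result_outer]
  | [p], hprod, _, hmem', hlen2 =>
    have hS : List.foldl PySem.Set.add PySem.Set.empty [p] = [p] := by
      simp [PySem.Set.add, PySem.Set.empty]
    rw [hS]
    have hnp : p * p ≠ num := fun h =>
      by have := hlen2 p p (by simp) (by simp) h; simp at this
    have hO : result_outer num [p] [p] = none :=
      outer_none num [p] [p] (by intro i hi j hj; simp at hi hj; subst hi; subst hj; exact hnp)
    simp only [hO]
    simp
  | [p, q], hprod, hpw, hmem', hlen2 =>
    have hp2 : 2 ≤ p := (hmem' p (by simp)).1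
    have hq2 : 2 ≤ q := (hmem' q (by simp)).1
    have hpq : p ≤ q := by
      have := List.pairwise_cons.mp hpw
      exact this.1 q (by simp)
    have hnum : p * q = num := by simpa [mul_comm] using hprod
    simp only [List.length_cons, List.length_nil, if_pos]
    rw [PySem.List.min?_id_cons, PySem.List.max?_id_cons]
    simp only [List.foldl_cons, List.foldl_nil]
    by_cases hpqe : p = q
    · subst hpqe
      have hS : (PySem.Set.empty.add p).add p = [p] := by
        simp [PySem.Set.add, PySem.Set.empty]
      rw [hS]
      have : result_outer num [p] [p] = some (p, p) := by
        simp [result_outer, result_inner, hnum]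
      rw [this]
    · have hS : (PySem.Set.empty.add p).add q = [p, q] := by
        simp [PySem.Set.add, PySem.Set.empty, Ne.symm hpqe]
      rw [hS]
      have hpp : p * p ≠ num := by
        intro h
        rw [← hnum] at h
        exact hpqe (mul_left_cancel₀ (by omega) h)
      have : result_outer num [p, q] [p, q] = some (p, q) := by
        simp [result_outer, result_inner, hpp, hnum]
      rw [this]
  | p :: q :: r :: rest, hprod, _, hmem', hlen2 =>
    have hout : result_outer num (List.foldl PySem.Set.add PySem.Set.empty (p :: q :: r :: rest))
        (List.foldl PySem.Set.add PySem.Set.empty (p :: q :: r :: rest)) = none := by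
      apply outer_none
      intro i hi j hj hij
      have hi' : i ∈ p :: q :: r :: rest :=
        (mem_foldl_add _ _ hi).resolve_left (by simp [PySem.Set.empty])
      have hj' : j ∈ p :: q :: r :: rest :=
        (mem_foldl_add _ _ hj).resolve_left (by simp [PySem.Set.empty])
      have := hlen2 i j hi' hj' hij
      simp at this
    simp only [hout]
    simp
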